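-- pv_equiv track=rewrite | github.com/osnium/bitcraft-preview | bitcraft_preview/win32/hotkey_monitor.py | parse_hotkey_spec
-- ===== SOURCE A (Python) =====
-- MODIFIER_VK = {
--     "CTRL": 0x11,
--     "CONTROL": 0x11,
--     "SHIFT": 0x10,
--     "ALT": 0x12,
--     "WIN": 0x5B,
--     "WINDOWS": 0x5B,
-- }
--
-- KEY_VK = {
--     "TAB": 0x09,
--     "SPACE": 0x20,
--     "ENTER": 0x0D,
--     "RETURN": 0x0D,
--     "ESC": 0x1B,
--     "ESCAPE": 0x1B,
--     "UP": 0x26,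
--     "DOWN": 0x28,
--     "LEFT": 0x25,
--     "RIGHT": 0x27,
-- }
--
-- MOUSE_ALIAS = {
--     "MOUSE1": 0x01,
--     "MOUSE2": 0x02,
--     "MOUSE3": 0x04,
--     "MOUSE4": 0x05,  # XBUTTON1
--     "MOUSE5": 0x06,  # XBUTTON2
--     "XBUTTON1": 0x05,
--     "XBUTTON2": 0x06,
-- }
--
-- def _vk_for_token(token: str) -> int | None:
--     tok = token.upper().strip()
--     if not tok:
--         return None
--
--     if tok in MOUSE_ALIAS:
--         return MOUSE_ALIAS[tok]
--
--     if len(tok) == 1 and "A" <= tok <= "Z":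
--         return ord(tok)
--
--     if len(tok) == 1 and "0" <= tok <= "9":
--         return ord(tok)
--
--     if tok.startswith("F") and tok[1:].isdigit():
--         fn_index = int(tok[1:])
--         if 1 <= fn_index <= 24:
--             return 0x70 + (fn_index - 1)
--
--     return KEY_VK.get(tok)
--
-- def parse_hotkey_spec(spec: str | None) -> tuple[list[int], int] | None:
--     if spec is None:
--         return None
--
--     tokens = [t.strip() for t in spec.replace(" ", "").split("+") if t.strip()]
--     if not tokens:
--         return None
--
--     modifiers: list[int] = []
--     main_key: int | None = None
--
--     for token in tokens:
--         upper = token.upper()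
--         if upper in MODIFIER_VK:
--             modifiers.append(MODIFIER_VK[upper])
--             continue
--
--         vk = _vk_for_token(upper)
--         if vk is None:
--             return None
--         if main_key is not None:
--             return None
--         main_key = vk
--
--     if main_key is None:
--         return None
--
--     deduped_modifiers = list(dict.fromkeys(modifiers))
--     return deduped_modifiers, main_key
-- ===== SOURCE B (Python) =====
-- MODIFIER_VK = {
--     "CTRL": 0x11,
--     "CONTROL": 0x11,
--     "SHIFT": 0x10,
--     "ALT": 0x12,
--     "WIN": 0x5B,
--     "WINDOWS": 0x5B,
-- }
--
-- KEY_VK = {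
--     "TAB": 0x09,
--     "SPACE": 0x20,
--     "ENTER": 0x0D,
--     "RETURN": 0x0D,
--     "ESC": 0x1B,
--     "ESCAPE": 0x1B,
--     "UP": 0x26,
--     "DOWN": 0x28,
--     "LEFT": 0x25,
--     "RIGHT": 0x27,
-- }
--
-- MOUSE_ALIAS = {
--     "MOUSE1": 0x01,
--     "MOUSE2": 0x02,
--     "MOUSE3": 0x04,
--     "MOUSE4": 0x05,
--     "MOUSE5": 0x06,
--     "XBUTTON1": 0x05,
--     "XBUTTON2": 0x06,
-- }
--
-- def _resolve_key(token):
--     tok = token.upper().strip()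
--     if tok in MOUSE_ALIAS:
--         return MOUSE_ALIAS[tok]
--     if len(tok) == 1 and ("0" <= tok <= "9" or "A" <= tok <= "Z"):
--         return ord(tok)
--     if tok.startswith("F") and tok[1:].isdigit() and 1 <= int(tok[1:]) <= 24:
--         return 0x70 + int(tok[1:]) - 1
--     return KEY_VK.get(tok)
--
-- def parse_hotkey_spec(spec):
--     if spec is None:
--         return None
--     tokens = [t.strip() for t in spec.replace(" ", "").split("+") if t.strip()]
--     modifiers = [MODIFIER_VK[t.upper()] for t in tokens if t.upper() in MODIFIER_VK]
--     others = [t for t in tokens if t.upper() not in MODIFIER_VK]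
--     if len(others) != 1:
--         return None
--     vk = _resolve_key(others[0])
--     if vk is None:
--         return None
--     return list(dict.fromkeys(modifiers)), vk
-- ===== Notes on version B (the rewrite author's own statement) =====
-- stated objective: simpler
-- what changed: Replaces A's stateful token loop (modifiers accumulator, main_key flag, three early returns) by partitioning the tokens into modifiers and non-modifiers with two comprehensions and a single len(others) == 1 check.
import Mathlib
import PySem

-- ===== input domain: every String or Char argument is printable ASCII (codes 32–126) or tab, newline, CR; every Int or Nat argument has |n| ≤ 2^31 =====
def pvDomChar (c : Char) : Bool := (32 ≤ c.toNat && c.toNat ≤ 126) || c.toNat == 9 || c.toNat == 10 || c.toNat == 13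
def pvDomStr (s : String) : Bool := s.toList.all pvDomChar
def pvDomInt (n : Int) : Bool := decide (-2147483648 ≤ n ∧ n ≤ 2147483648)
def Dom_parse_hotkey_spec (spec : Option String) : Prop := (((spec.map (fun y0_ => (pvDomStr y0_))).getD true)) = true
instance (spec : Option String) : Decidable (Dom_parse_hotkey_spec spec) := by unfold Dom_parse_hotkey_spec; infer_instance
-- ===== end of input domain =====

-- B replaces A's stateful loop (modifiers accumulator + main_key flag + three early returns)
-- by a two-way partition of the tokens and a length check; objective: simpler.

-- module constants (shared by both Pythons)
def pvMODIFIER_VK : PySem.Dict (List Char) Int := PySem.Dict.ofList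
  [("CTRL".toList, 0x11), ("CONTROL".toList, 0x11), ("SHIFT".toList, 0x10),
   ("ALT".toList, 0x12), ("WIN".toList, 0x5B), ("WINDOWS".toList, 0x5B)]

def pvKEY_VK : PySem.Dict (List Char) Int := PySem.Dict.ofList
  [("TAB".toList, 0x09), ("SPACE".toList, 0x20), ("ENTER".toList, 0x0D), ("RETURN".toList, 0x0D),
   ("ESC".toList, 0x1B), ("ESCAPE".toList, 0x1B), ("UP".toList, 0x26), ("DOWN".toList, 0x28),
   ("LEFT".toList, 0x25), ("RIGHT".toList, 0x27)]

def pvMOUSE_ALIAS : PySem.Dict (List Char) Int := PySem.Dict.ofList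
  [("MOUSE1".toList, 0x01), ("MOUSE2".toList, 0x02), ("MOUSE3".toList, 0x04),
   ("MOUSE4".toList, 0x05), ("MOUSE5".toList, 0x06), ("XBUTTON1".toList, 0x05), ("XBUTTON2".toList, 0x06)]

-- tokens = [t.strip() for t in spec.replace(" ", "").split("+") if t.strip()]  (identical line in A and B)
def pvTokens (s : List Char) : List (List Char) :=
  ((PySem.Chars.splitOn (PySem.Chars.replace s " ".toList "".toList) "+".toList).filter
    (fun t => !(PySem.Chars.strip t).isEmpty)).map PySem.Chars.strip

-- ===== PORT A =====
def vk_for_token (token : List Char) : Option Int :=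
  let tok := PySem.Chars.strip (PySem.Chars.upper token)
  if tok.isEmpty then none
  else if pvMOUSE_ALIAS.contains tok then some (pvMOUSE_ALIAS.getD tok 0)
  else if (tok.length == 1) && !PySem.Chars.strLt tok "A".toList && !PySem.Chars.strLt "Z".toList tok then
    some ((tok.headD ' ').toNat : Int)      -- ord(tok); guarded by len(tok) == 1
  else if (tok.length == 1) && !PySem.Chars.strLt tok "0".toList && !PySem.Chars.strLt "9".toList tok then
    some ((tok.headD ' ').toNat : Int)
  else if PySem.Chars.startswith tok "F".toList
          && PySem.Chars.strIsdigit (PySem.Chars.slice tok (some 1) none) then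
    match PySem.Int.ofChars? (PySem.Chars.slice tok (some 1) none) with
    | some fnIndex =>
        if 1 ≤ fnIndex ∧ fnIndex ≤ 24 then some (0x70 + (fnIndex - 1))
        else pvKEY_VK.get? tok
    | none => pvKEY_VK.get? tok             -- unreachable: isdigit guards int()
  else pvKEY_VK.get? tok

-- the for-loop over tokens with its three early returns; after the loop: dedup + return
def pvLoopA : List (List Char) → List Int → Option Int → Option (List Int × Int)
  | [], modifiers, mainKey =>
    match mainKey with
    | none => none
    | some k => some (PySem.List.dedup modifiers, k)
  | token :: rest, modifiers, mainKey =>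
    let upper := PySem.Chars.upper token
    if pvMODIFIER_VK.contains upper then
      pvLoopA rest (modifiers ++ [pvMODIFIER_VK.getD upper 0]) mainKey
    else
      match vk_for_token upper with
      | none => none
      | some vk =>
        match mainKey with
        | some _ => none
        | none => pvLoopA rest modifiers (some vk)

def parse_hotkey_spec (spec : Option String) : Option (List Int × Int) :=
  match spec with
  | none => none
  | some s =>
    let tokens := pvTokens s.toList
    if tokens.isEmpty then none
    else pvLoopA tokens [] none

-- ===== PORT B =====
def resolve_key (token : List Char) : Option Int :=
  let tok := PySem.Chars.strip (PySem.Chars.upper token)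
  if pvMOUSE_ALIAS.contains tok then some (pvMOUSE_ALIAS.getD tok 0)
  else if (tok.length == 1) &&
      ((!PySem.Chars.strLt tok "0".toList && !PySem.Chars.strLt "9".toList tok) ||
       (!PySem.Chars.strLt tok "A".toList && !PySem.Chars.strLt "Z".toList tok)) then
    some ((tok.headD ' ').toNat : Int)      -- ord(tok); guarded by len(tok) == 1
  else if PySem.Chars.startswith tok "F".toList
        && PySem.Chars.strIsdigit (PySem.Chars.slice tok (some 1) none)
        && (match PySem.Int.ofChars? (PySem.Chars.slice tok (some 1) none) with
            | some n => decide (1 ≤ n ∧ n ≤ 24)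
            | none => false) then
    some (0x70 + (PySem.Int.ofChars? (PySem.Chars.slice tok (some 1) none)).getD 0 - 1)
  else pvKEY_VK.get? tok

def parse_hotkey_spec_alt (spec : Option String) : Option (List Int × Int) :=
  match spec with
  | none => none
  | some s =>
    let tokens := pvTokens s.toList
    let modifiers := (tokens.filter (fun t => pvMODIFIER_VK.contains (PySem.Chars.upper t))).map
        (fun t => pvMODIFIER_VK.getD (PySem.Chars.upper t) 0)
    let others := tokens.filter (fun t => !pvMODIFIER_VK.contains (PySem.Chars.upper t))
    if others.length ≠ 1 then none
    else
      match PySem.List.pyGet? others 0 with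
      | none => none                        -- unreachable: len(others) == 1
      | some o =>
        match resolve_key o with
        | none => none
        | some vk => some (PySem.List.dedup modifiers, vk)

-- ===== PRECONDITION & SPEC =====
def Spec_parse_hotkey_spec (spec : Option String) (out : Option (List Int × Int)) : Prop := out = parse_hotkey_spec_alt spec
instance (spec : Option String) (out : Option (List Int × Int)) : Decidable (Spec_parse_hotkey_spec spec out) := by unfold Spec_parse_hotkey_spec; infer_instance

-- ===== CLAIM (what is proved, stated in full; the proofs are below) =====
def Claim_equal_parse_hotkey_spec : Prop := ∀ (spec : Option String), Dom_parse_hotkey_spec spec → Spec_parse_hotkey_spec spec (parse_hotkey_spec spec)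

-- ===== LEMMAS AND PROOFS =====

theorem pvChar_le_toNat (a b : Char) : a ≤ b ↔ a.toNat ≤ b.toNat := by
  rw [Char.le_def, UInt32.le_iff_toBitVec_le]
  simp only [Char.toNat, UInt32.toNat, BitVec.le_def]

theorem pvUpperChar_idem (c : Char) : PySem.Chars.upperChar (PySem.Chars.upperChar c) = PySem.Chars.upperChar c := by
  unfold PySem.Chars.upperChar PySem.Chars.islower
  split_ifs with h1 h2 <;> try rfl
  exfalso
  simp only [Bool.and_eq_true, decide_eq_true_eq, pvChar_le_toNat] at h1 h2
  have h97 : ('a' : Char).toNat = 97 := rfl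
  have h122 : ('z' : Char).toNat = 122 := rfl
  have hv : (c.toNat - 32).isValidChar := by left; omega
  rw [show (Char.ofNat (c.toNat - 32)).toNat = c.toNat - 32 from by
    rw [Char.toNat_ofNat, if_pos hv]] at h2
  omega

theorem pvUpper_idem (s : List Char) : PySem.Chars.upper (PySem.Chars.upper s) = PySem.Chars.upper s := by
  unfold PySem.Chars.upper
  rw [List.map_map]
  exact List.map_congr_left (fun c _ => pvUpperChar_idem c)

theorem pvBranchShapeSome {a : Type} (b1 b2 b3 b4 b5 b6 b7 b8 : Bool) (P : Prop) [Decidable P]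
    (m v F k : a) :
    (if b1 then m
     else if b2 && !b3 && !b4 then v
     else if b2 && !b5 && !b6 then v
     else if b7 && b8 then (if P then F else k)
     else k)
    = (if b1 then m
       else if b2 && ((!b5 && !b6) || (!b3 && !b4)) then v
       else if b7 && b8 && decide P then F
       else k) := by
  by_cases hP : P <;>
    simp only [hP, decide_true, decide_false, if_true, if_false] <;>
    cases b1 <;> cases b2 <;> cases b3 <;> cases b4 <;> cases b5 <;> cases b6 <;>
      cases b7 <;> cases b8 <;> rfl

theorem pvBranchShapeNone {a : Type} (b1 b2 b3 b4 b5 b6 b7 b8 : Bool) (m v F k : a) :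
    (if b1 then m
     else if b2 && !b3 && !b4 then v
     else if b2 && !b5 && !b6 then v
     else if b7 && b8 then k
     else k)
    = (if b1 then m
       else if b2 && ((!b5 && !b6) || (!b3 && !b4)) then v
       else if b7 && b8 && false then F
       else k) := by
  cases b1 <;> cases b2 <;> cases b3 <;> cases b4 <;> cases b5 <;> cases b6 <;>
    cases b7 <;> cases b8 <;> rfl

theorem pvResolve_eq (token : List Char) : vk_for_token token = resolve_key token := by
  unfold vk_for_token resolve_key
  generalize PySem.Chars.strip (PySem.Chars.upper token) = tok
  cases tok with
  | nil => decide
  | cons c cs =>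
    simp only [List.isEmpty_cons, Bool.false_eq_true, if_false]
    cases hof : PySem.Int.ofChars? (PySem.Chars.slice (c :: cs) (some 1) none) with
    | none =>
      simp only [hof]
      exact pvBranchShapeNone _ _ _ _ _ _ _ _ _ _
        (some (0x70 + (0 : Int) - 1)) _
    | some n =>
      simp only [hof, Option.getD_some]
      rw [show (0x70 : Int) + n - 1 = 0x70 + (n - 1) from by ring]
      exact pvBranchShapeSome _ _ _ _ _ _ _ _ _ _ _ _ _

theorem pvVk_upper (t : List Char) : vk_for_token (PySem.Chars.upper t) = vk_for_token t := by
  unfold vk_for_token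
  rw [pvUpper_idem]

theorem pvResolve_upper (t : List Char) : resolve_key (PySem.Chars.upper t) = resolve_key t := by
  rw [← pvResolve_eq, pvVk_upper, pvResolve_eq]

-- A's loop once a main key k has been found
theorem pvLoopA_some (ts : List (List Char)) (mods : List Int) (k : Int) :
    pvLoopA ts mods (some k) =
      if ts.filter (fun t => !pvMODIFIER_VK.contains (PySem.Chars.upper t)) = [] then
        some (PySem.List.dedup (mods ++ (ts.filter (fun t => pvMODIFIER_VK.contains (PySem.Chars.upper t))).map
          (fun t => pvMODIFIER_VK.getD (PySem.Chars.upper t) 0)), k)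
      else none := by
  induction ts generalizing mods with
  | nil => simp [pvLoopA]
  | cons t ts ih =>
    simp only [pvLoopA]
    by_cases hp : pvMODIFIER_VK.contains (PySem.Chars.upper t) = true
    · simp [hp, ih, List.filter_cons]
    · simp only [Bool.not_eq_true] at hp
      cases hv : vk_for_token (PySem.Chars.upper t) <;>
        simp [hp, hv, List.filter_cons]

-- A's loop while no main key has been found yet
theorem pvLoopA_none (ts : List (List Char)) (mods : List Int) :
    pvLoopA ts mods none =
      match ts.filter (fun t => !pvMODIFIER_VK.contains (PySem.Chars.upper t)) with
      | [] => none
      | o :: rest =>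
        match vk_for_token (PySem.Chars.upper o) with
        | none => none
        | some vk =>
          if rest = [] then
            some (PySem.List.dedup (mods ++ (ts.filter (fun t => pvMODIFIER_VK.contains (PySem.Chars.upper t))).map
              (fun t => pvMODIFIER_VK.getD (PySem.Chars.upper t) 0)), vk)
          else none := by
  induction ts generalizing mods with
  | nil => simp [pvLoopA]
  | cons t ts ih =>
    simp only [pvLoopA]
    by_cases hp : pvMODIFIER_VK.contains (PySem.Chars.upper t) = true
    · rw [ih]
      simp only [List.filter_cons, hp, if_pos, Bool.not_true, Bool.false_eq_true, if_false]
      cases ts.filter (fun t => !pvMODIFIER_VK.contains (PySem.Chars.upper t)) with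
      | nil => rfl
      | cons o rest =>
        cases vk_for_token (PySem.Chars.upper o) <;> simp [List.append_assoc]
    · simp only [Bool.not_eq_true] at hp
      simp only [List.filter_cons, hp, Bool.false_eq_true, if_false, Bool.not_false, if_true]
      cases hv : vk_for_token (PySem.Chars.upper t) with
      | none => simp [hv]
      | some vk => simp [hv, pvLoopA_some]

-- ===== VERDICT (by name: the statement is the Claim_ definition above) =====
theorem parse_hotkey_spec_spec : Claim_equal_parse_hotkey_spec := by
  intro spec _
  unfold Spec_parse_hotkey_spec
  cases spec with
  | none => rfl
  | some s =>
    unfold parse_hotkey_spec parse_hotkey_spec_alt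
    simp only
    rw [pvLoopA_none]
    by_cases ht : pvTokens s.toList = []
    · simp [ht]
    · simp only [List.isEmpty_iff, ht, if_false]
      cases ho : (pvTokens s.toList).filter (fun t => !pvMODIFIER_VK.contains (PySem.Chars.upper t)) with
      | nil => simp
      | cons o rest =>
        cases rest with
        | nil =>
          have h1 : PySem.List.pyGet? [o] 0 = some o := rfl
          cases hr : resolve_key o <;>
            simp [h1, hr, pvVk_upper, pvResolve_eq, pvResolve_upper]
        | cons r rest =>
          cases hr : resolve_key o <;> simp [hr, pvVk_upper, pvResolve_eq, pvResolve_upper]
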